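-- pv_equiv track=rewrite | github.com/SummitAnthony/CSE220 | Lab Assignments/Lab 1/Assignment 1.py | Max_Bunch_Count
-- ===== SOURCE A (Python) =====
-- def Max_Bunch_Count(source):
--     sum_list = []
--     first = source[0]
--     c = 0
--     for values in source:
--         if values == first:
--             c += 1
--
--         else:
--             first = values
--             c = 1
--         sum_list.append(c)
--
--     max_val = sum_list[0]
--     for i in sum_list:
--         if i > max_val:
--             max_val = i
--
--     return max_val
-- ===== SOURCE B (Python) =====
-- def Max_Bunch_Count(source):
--     # Two-pointer scan over runs: for each run start i, advance j to the run's
--     # end, then combine the run length j - i into the running best.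
--     n = len(source)
--     best = 0
--     i = 0
--     while i < n:
--         j = i + 1
--         while j < n and source[j] == source[i]:
--             j += 1
--         if j - i > best:
--             best = j - i
--         i = j
--     return best
-- ===== Notes on version B (the rewrite author's own statement) =====
-- stated objective: alternative
-- what changed: B is a two-pointer scan over runs (an outer loop per run whose inner loop advances j to the run's end, combining j - i into a running best), instead of A's element-wise scan that materialises a list of running counts and then max-scans it in a second pass.
import Mathlib
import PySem

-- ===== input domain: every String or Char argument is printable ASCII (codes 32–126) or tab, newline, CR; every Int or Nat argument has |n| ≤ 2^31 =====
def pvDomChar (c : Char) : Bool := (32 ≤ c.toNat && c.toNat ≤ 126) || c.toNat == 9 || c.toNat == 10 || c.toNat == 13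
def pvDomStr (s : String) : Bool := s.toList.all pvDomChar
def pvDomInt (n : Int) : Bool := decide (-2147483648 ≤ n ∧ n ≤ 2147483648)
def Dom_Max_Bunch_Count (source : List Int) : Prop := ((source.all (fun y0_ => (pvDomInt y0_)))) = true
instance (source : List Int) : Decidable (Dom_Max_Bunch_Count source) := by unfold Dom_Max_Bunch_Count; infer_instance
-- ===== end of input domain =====

-- B replaces A's materialised list of running counts plus second max-scan by a two-pointer scan
-- over runs (inner loop finds each run's end); same values proved on all non-empty lists
-- (A raises IndexError on [], which Pre_ excludes; B returns 0 there).

-- ===== PORT A =====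
-- state: (sum_list, first, c); 'source[0]' is total via getD 0, Pre_ excludes the empty list where Python raises IndexError
def Max_Bunch_Count (source : List Int) : Int :=
  let first0 := (PySem.List.pyGet? source 0).getD 0
  let st := source.foldl
    (fun (acc : List Int × Int × Int) values =>
      let sum_list := acc.1
      let first := acc.2.1
      let c := acc.2.2
      if values = first then (sum_list ++ [c + 1], first, c + 1)
      else (sum_list ++ [1], values, 1))
    ([], first0, 0)
  let sum_list := st.1
  let max_val0 := (PySem.List.pyGet? sum_list 0).getD 0
  sum_list.foldl (fun max_val i => if i > max_val then i else max_val) max_val0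

-- ===== PORT B =====
-- inner while loop of Source B: 'while j < n and source[j] == source[i]: j += 1'; both indices are
-- kept in [0, n) by the loops, so the '.getD 0' defaults of pyGet? are never taken
def pvRunEnd (source : List Int) (i j : Int) : Int :=
  if h : j < (source.length : Int) ∧
      (PySem.List.pyGet? source j).getD 0 = (PySem.List.pyGet? source i).getD 0 then
    pvRunEnd source i (j + 1)
  else j
termination_by ((source.length : Int) - j).toNat
decreasing_by
  obtain ⟨h1, -⟩ := h
  omega

-- cited by pvOuterB's decreasing_by: the inner loop never moves j backwards
lemma pvRunEnd_ge (source : List Int) (i j : Int) : j ≤ pvRunEnd source i j := by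
  fun_induction pvRunEnd source i j <;> omega

-- outer while loop of Source B over run starts i, carrying best
def pvOuterB (source : List Int) (i best : Int) : Int :=
  if h : i < (source.length : Int) then
    let j := pvRunEnd source i (i + 1)
    pvOuterB source j (if j - i > best then j - i else best)
  else best
termination_by ((source.length : Int) - i).toNat
decreasing_by
  have := pvRunEnd_ge source i (i + 1)
  omega

def Max_Bunch_Count_alt (source : List Int) : Int := pvOuterB source 0 0

-- ===== PRECONDITION & SPEC =====
-- Pre_ excludes only the empty list, on which Python A raises IndexError at source[0]
def Pre_Max_Bunch_Count (source : List Int) : Prop := source ≠ []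
instance (source : List Int) : Decidable (Pre_Max_Bunch_Count source) := by unfold Pre_Max_Bunch_Count; infer_instance
def pvWitness_Max_Bunch_Count : List Int := [1, 1, 2]

def Spec_Max_Bunch_Count (source : List Int) (out : Int) : Prop := out = Max_Bunch_Count_alt source
instance (source : List Int) (out : Int) : Decidable (Spec_Max_Bunch_Count source out) := by unfold Spec_Max_Bunch_Count; infer_instance

-- ===== CLAIM (what is proved, stated in full; the proofs are below) =====
def Claim_equal_Max_Bunch_Count : Prop := ∀ (source : List Int), Dom_Max_Bunch_Count source → Pre_Max_Bunch_Count source → Spec_Max_Bunch_Count source (Max_Bunch_Count source)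

-- ===== LEMMAS AND PROOFS =====

-- the sequence of running counts A's first loop steps through
def pvCounts : List Int → Int → Int → List Int
  | [], _, _ => []
  | v :: t, first, c =>
    if v = first then (c + 1) :: pvCounts t first (c + 1)
    else 1 :: pvCounts t v 1

def pvMaxf (m : Int) (xs : List Int) : Int :=
  xs.foldl (fun max_val i => if i > max_val then i else max_val) m

lemma pvA_loop (l : List Int) (sl : List Int) (first c : Int) :
    (l.foldl
      (fun (acc : List Int × Int × Int) values =>
        if values = acc.2.1 then (acc.1 ++ [acc.2.2 + 1], acc.2.1, acc.2.2 + 1)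
        else (acc.1 ++ [1], values, 1))
      (sl, first, c)).1 = sl ++ pvCounts l first c := by
  induction l generalizing sl first c with
  | nil => simp [pvCounts]
  | cons v t ih =>
    by_cases h : v = first <;>
      simp [pvCounts, h, ih, List.append_assoc]

-- (length of leading run of x, remainder) — the list-level picture of the inner loop
def pvRun (x : Int) : List Int → Nat × List Int
  | [] => (0, [])
  | r :: t => if r = x then ((pvRun x t).1 + 1, (pvRun x t).2) else (0, r :: t)

lemma pvRun_len (x : Int) (t : List Int) : (pvRun x t).2.length ≤ t.length := by
  induction t with
  | nil => simp [pvRun]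
  | cons r t ih =>
    by_cases h : r = x
    · simp only [pvRun, if_pos h]
      exact le_trans ih (Nat.le_succ _)
    · simp [pvRun, h]

lemma pvRun_drop (x : Int) (t : List Int) : (pvRun x t).2 = t.drop (pvRun x t).1 := by
  induction t with
  | nil => simp [pvRun]
  | cons r t ih =>
    by_cases h : r = x
    · simp [pvRun, h, ih]
    · simp [pvRun, h]

-- the outer loop at the list level
def pvListB : List Int → Int → Int
  | [], best => best
  | x :: t, best =>
    pvListB (pvRun x t).2
      (if ((pvRun x t).1 : Int) + 1 > best then ((pvRun x t).1 : Int) + 1 else best)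
termination_by l _ => l.length
decreasing_by
  have := pvRun_len x t
  simp only [List.length_cons]
  omega

-- from 'source.drop j.toNat = r :: t': j is in range, source[j] = r, and the drop advances
lemma pvDropCons {source : List Int} {j r : Int} {t : List Int}
    (hj : 0 ≤ j) (hdrop : source.drop j.toNat = r :: t) :
    j.toNat < source.length ∧ (PySem.List.pyGet? source j).getD 0 = r ∧
      source.drop (j + 1).toNat = t := by
  have hlt : j.toNat < source.length := by
    by_contra hh
    rw [List.drop_eq_nil_iff.mpr (by omega)] at hdrop
    exact List.cons_ne_nil r t hdrop.symm
  have hget : source[j.toNat]? = some r := by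
    have h0 := congrArg (fun l => l[0]?) hdrop
    simpa [List.getElem?_drop] using h0
  refine ⟨hlt, ?_, ?_⟩
  · rw [PySem.List.pyGet?_of_nonneg source hj, hget]; rfl
  · have h2 : (j + 1).toNat = j.toNat + 1 := by omega
    have h3 := congrArg (fun l => List.drop 1 l) hdrop
    simp only [List.drop_drop] at h3
    rw [h2]
    simpa using h3

lemma pvRunEnd_eq (l : List Int) : ∀ (source : List Int) (i j : Int), 0 ≤ j →
    source.drop j.toNat = l →
    pvRunEnd source i j
      = j + ((pvRun ((PySem.List.pyGet? source i).getD 0) l).1 : Int) := by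
  induction l with
  | nil =>
    intro source i j hj hdrop
    have hlen : source.length ≤ j.toNat := List.drop_eq_nil_iff.mp hdrop
    rw [pvRunEnd, dif_neg (by push_neg; intro h1; omega)]
    simp [pvRun]
  | cons r t ih =>
    intro source i j hj hdrop
    obtain ⟨hlt, hpy, hdrop1⟩ := pvDropCons hj hdrop
    rw [pvRunEnd]
    by_cases hx : r = (PySem.List.pyGet? source i).getD 0
    · rw [dif_pos ⟨by omega, by rw [hpy, hx]⟩]
      rw [ih source i (j + 1) (by omega) hdrop1]
      simp only [pvRun, if_pos hx]
      push_cast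
      ring
    · rw [dif_neg (by rw [hpy]; exact fun h => hx h.2)]
      simp [pvRun, hx]

lemma pvOuter_eq (n : Nat) : ∀ (l source : List Int) (i best : Int), l.length ≤ n → 0 ≤ i →
    source.drop i.toNat = l → pvOuterB source i best = pvListB l best := by
  induction n with
  | zero =>
    intro l source i best hn hi hdrop
    have hl : l = [] := List.length_eq_zero_iff.mp (Nat.le_zero.mp hn)
    subst hl
    have hlen : source.length ≤ i.toNat := List.drop_eq_nil_iff.mp hdrop
    rw [pvOuterB, dif_neg (by omega)]
    simp [pvListB]
  | succ n ihn =>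
    intro l source i best hn hi hdrop
    match l with
    | [] =>
      have hlen : source.length ≤ i.toNat := List.drop_eq_nil_iff.mp hdrop
      rw [pvOuterB, dif_neg (by omega)]
      simp [pvListB]
    | x :: t =>
      obtain ⟨hlt, hpy, hdrop1⟩ := pvDropCons hi hdrop
      have hj : pvRunEnd source i (i + 1) = (i + 1) + ((pvRun x t).1 : Int) := by
        rw [pvRunEnd_eq t source i (i + 1) (by omega) hdrop1, hpy]
      have hdropj : source.drop ((i + 1) + ((pvRun x t).1 : Int)).toNat = (pvRun x t).2 := by
        have h5 := congrArg (fun l => List.drop (pvRun x t).1 l) hdrop1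
        simp only [List.drop_drop] at h5
        rw [← pvRun_drop] at h5
        have h4 : ((i + 1) + ((pvRun x t).1 : Int)).toNat = (i + 1).toNat + (pvRun x t).1 := by omega
        rw [h4]
        exact h5
      rw [pvOuterB, dif_pos (by omega : i < (source.length : Int))]
      simp only [hj]
      rw [ihn (pvRun x t).2 source ((i + 1) + ((pvRun x t).1 : Int))
            (if (i + 1) + ((pvRun x t).1 : Int) - i > best then (i + 1) + ((pvRun x t).1 : Int) - i else best)
            (le_trans (pvRun_len x t) (by simp only [List.length_cons] at hn; omega))
            (by omega) hdropj]
      simp only [pvListB]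
      congr 1
      have harith : (i + 1) + ((pvRun x t).1 : Int) - i = ((pvRun x t).1 : Int) + 1 := by ring
      rw [harith]

lemma pvListB_max (n : Nat) : ∀ (l : List Int) (b c : Int), l.length ≤ n →
    pvListB l (max b c) = max b (pvListB l c) := by
  induction n with
  | zero =>
    intro l b c hn
    have hl : l = [] := List.length_eq_zero_iff.mp (Nat.le_zero.mp hn)
    subst hl
    simp [pvListB]
  | succ n ihn =>
    intro l b c hn
    match l with
    | [] => simp [pvListB]
    | x :: t =>
      have hlen : (pvRun x t).2.length ≤ n := by
        have := pvRun_len x t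
        simp only [List.length_cons] at hn
        omega
      simp only [pvListB]
      have h1 : (if ((pvRun x t).1 : Int) + 1 > max b c then ((pvRun x t).1 : Int) + 1 else max b c)
          = max b (if ((pvRun x t).1 : Int) + 1 > c then ((pvRun x t).1 : Int) + 1 else c) := by
        simp only [max_def]
        split_ifs <;> omega
      rw [h1, ihn (pvRun x t).2 b _ hlen]

lemma pvListB_cons_zero (r : Int) (t : List Int) :
    pvListB (r :: t) 0 = max (1 + ((pvRun r t).1 : Int)) (pvListB (pvRun r t).2 0) := by
  simp only [pvListB]
  have h1 : (if ((pvRun r t).1 : Int) + 1 > 0 then ((pvRun r t).1 : Int) + 1 else 0)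
      = max (1 + ((pvRun r t).1 : Int)) 0 := by
    simp only [max_def]
    split_ifs <;> omega
  rw [h1, pvListB_max (pvRun r t).2.length (pvRun r t).2 _ 0 le_rfl]

-- B's value on a run continued at count c, seen from A's state
def pvG (t : List Int) (x c : Int) : Int :=
  max (c + ((pvRun x t).1 : Int)) (pvListB (pvRun x t).2 0)

lemma pvG_ge (t : List Int) (x c : Int) : c ≤ pvG t x c :=
  le_trans (by omega) (le_max_left (c + ((pvRun x t).1 : Int)) _)

lemma pvMaxf_counts (t : List Int) (x c best : Int) (h1 : 1 ≤ c) (h2 : c ≤ best) :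
    pvMaxf best (pvCounts t x c) = max best (pvG t x c) := by
  induction t generalizing x c best with
  | nil =>
    simp only [pvCounts, pvMaxf, List.foldl_nil, pvG, pvRun, pvListB]
    simp only [max_def]
    split_ifs <;> omega
  | cons r t ih =>
    by_cases h : r = x
    · have hrec := ih x (c + 1) (max best (c + 1)) (by omega) (le_max_right _ _)
      have hstep : pvMaxf best (pvCounts (r :: t) x c)
          = pvMaxf (max best (c + 1)) (pvCounts t x (c + 1)) := by
        simp only [pvCounts, if_pos h, pvMaxf, List.foldl_cons]
        congr 1
        omega
      have hG : pvG (r :: t) x c = pvG t x (c + 1) := by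
        simp only [pvG, pvRun, if_pos h]
        congr 1
        push_cast
        ring
      have hge := pvG_ge t x (c + 1)
      rw [hstep, hrec, hG]
      simp only [max_def]
      split_ifs <;> omega
    · have hrec := ih r 1 (max best 1) (le_refl 1) (le_max_right _ _)
      have hstep : pvMaxf best (pvCounts (r :: t) x c)
          = pvMaxf (max best 1) (pvCounts t r 1) := by
        simp only [pvCounts, if_neg h, pvMaxf, List.foldl_cons]
        congr 1
        omega
      have hG : pvG (r :: t) x c = max c (pvG t r 1) := by
        simp only [pvG, pvRun, if_neg h, Nat.cast_zero, add_zero, pvListB_cons_zero]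
      have hge := pvG_ge t r 1
      rw [hstep, hrec, hG]
      simp only [max_def]
      split_ifs <;> omega

-- ===== VERDICT (by name: the statement is the Claim_ definition above) =====
theorem Max_Bunch_Count_spec : Claim_equal_Max_Bunch_Count := by
  intro source _ hpre
  unfold Spec_Max_Bunch_Count Max_Bunch_Count
  match source with
  | [] => exact absurd rfl hpre
  | v :: t =>
    have h0 : (PySem.List.pyGet? (v :: t) (0 : Int)).getD 0 = v := by
      simp [PySem.List.pyGet?, PySem.List.pyIdx?]
    simp only [h0]
    rw [pvA_loop]
    have hc : pvCounts (v :: t) v 0 = 1 :: pvCounts t v 1 := by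
      simp [pvCounts]
    rw [hc]
    have h1 : (PySem.List.pyGet? ([] ++ (1 :: pvCounts t v 1) : List Int) (0 : Int)).getD 0 = 1 := by
      simp [PySem.List.pyGet?, PySem.List.pyIdx?]
    rw [h1]
    have halt : Max_Bunch_Count_alt (v :: t) = pvG t v 1 := by
      unfold Max_Bunch_Count_alt pvG
      rw [pvOuter_eq (v :: t).length (v :: t) (v :: t) 0 0 le_rfl le_rfl (by simp)]
      exact pvListB_cons_zero v t
    have hmc := pvMaxf_counts t v 1 1 le_rfl le_rfl
    have hge := pvG_ge t v 1
    show pvMaxf 1 ([] ++ (1 :: pvCounts t v 1)).tail = Max_Bunch_Count_alt (v :: t)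
    simp only [List.nil_append, List.tail_cons]
    rw [hmc, halt]
    simp only [max_def]
    split_ifs <;> omega
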